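-- pv_equiv track=rewrite | github.com/lucaski2/Competitive-Programming | USACO/JohnPermutation/main.py | P_to_H
-- ===== SOURCE A (Python) =====
-- def P_to_H(P):
--     H = []
--     while len(P) > 1:
--         if P[0] > P[-1]:
--             H.append(P[1])
--             P = P[1:]
--         else:
--             H.append(P[-2])
--             P = P[:-1]
--     return H
-- ===== SOURCE B (Python) =====
-- def P_to_H(P):
--     lo, hi = 0, len(P) - 1
--     H = []
--     while lo < hi:
--         if P[lo] > P[hi]:
--             lo += 1
--             H.append(P[lo])
--         else:
--             hi -= 1
--             H.append(P[hi])
--     return H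
-- ===== Notes on version B (the rewrite author's own statement) =====
-- stated objective: faster
-- what changed: B walks two index pointers lo/hi over the untouched input list instead of rebuilding the list by slicing on every iteration.
import Mathlib
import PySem

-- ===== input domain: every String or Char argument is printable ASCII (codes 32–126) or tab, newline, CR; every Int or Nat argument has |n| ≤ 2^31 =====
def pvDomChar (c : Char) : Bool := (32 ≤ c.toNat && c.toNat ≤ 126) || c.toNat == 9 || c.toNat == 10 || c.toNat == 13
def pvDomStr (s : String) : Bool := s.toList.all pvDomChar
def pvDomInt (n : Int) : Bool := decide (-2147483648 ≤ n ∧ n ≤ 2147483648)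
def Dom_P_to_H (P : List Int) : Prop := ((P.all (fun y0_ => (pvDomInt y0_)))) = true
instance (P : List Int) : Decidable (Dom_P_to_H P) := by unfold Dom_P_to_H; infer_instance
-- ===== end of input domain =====

-- B replaces A's repeated slicing (a fresh list each iteration) by two index
-- pointers lo/hi into the untouched input: asymptotically faster, same values.

-- ===== PORT A =====
-- the while-loop with state (H, P); indices 0, -1, 1, -2 are always in range since len(P) > 1
def P_to_H_loop (H P : List Int) : List Int :=
  if h : 1 < P.length then
    if PySem.List.pyGetD P 0 0 > PySem.List.pyGetD P (-1) 0 then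
      P_to_H_loop (H ++ [PySem.List.pyGetD P 1 0]) (PySem.List.slice P (some 1) none)
    else
      P_to_H_loop (H ++ [PySem.List.pyGetD P (-2) 0]) (PySem.List.slice P none (some (-1)))
  else H
termination_by P.length
decreasing_by
  · simp [PySem.List.slice_from_one]; omega
  · simp [PySem.List.slice_to_neg_one, List.length_dropLast]; omega

def P_to_H (P : List Int) : List Int := P_to_H_loop [] P

-- ===== PORT B =====
def P_to_H_altLoop (P : List Int) (lo hi : Nat) : List Int :=
  if h : lo < hi then
    if P.getD lo 0 > P.getD hi 0 then
      P.getD (lo + 1) 0 :: P_to_H_altLoop P (lo + 1) hi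
    else
      P.getD (hi - 1) 0 :: P_to_H_altLoop P lo (hi - 1)
  else []
termination_by hi - lo
decreasing_by all_goals omega

def P_to_H_alt (P : List Int) : List Int := P_to_H_altLoop P 0 (P.length - 1)

-- ===== PRECONDITION & SPEC =====
def Spec_P_to_H (P : List Int) (out : List Int) : Prop := out = P_to_H_alt P
instance (P : List Int) (out : List Int) : Decidable (Spec_P_to_H P out) := by unfold Spec_P_to_H; infer_instance

-- ===== CLAIM (what is proved, stated in full; the proofs are below) =====
def Claim_equal_P_to_H : Prop := ∀ (P : List Int), Dom_P_to_H P → Spec_P_to_H P (P_to_H P)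

-- ===== LEMMAS AND PROOFS =====
-- A's current list after some iterations is the segment Q[lo..hi] of the original list.
def pvSeg (Q : List Int) (lo hi : Nat) : List Int := (Q.drop lo).take (hi + 1 - lo)

theorem pvSeg_length (Q : List Int) (lo hi : Nat) (hhi : hi < Q.length) (hlo : lo ≤ hi) :
    (pvSeg Q lo hi).length = hi + 1 - lo := by
  simp [pvSeg]; omega

theorem pvSeg_getElem (Q : List Int) (lo hi i : Nat) (hhi : hi < Q.length)
    (hi' : i < hi + 1 - lo) :
    (pvSeg Q lo hi)[i]'(by simp [pvSeg]; omega) = Q[lo + i]'(by omega) := by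
  simp [pvSeg, List.getElem_take, List.getElem_drop]

theorem pvSeg_tail (Q : List Int) (lo hi : Nat) :
    (pvSeg Q lo hi).tail = pvSeg Q (lo + 1) hi := by
  unfold pvSeg
  rw [← List.drop_one, List.drop_take, List.drop_drop]
  congr 1

theorem pvSeg_dropLast (Q : List Int) (lo hi : Nat) (hhi : hi < Q.length) (hlt : lo < hi) :
    (pvSeg Q lo hi).dropLast = pvSeg Q lo (hi - 1) := by
  have h1 : (pvSeg Q lo hi).dropLast = (pvSeg Q lo hi).take ((pvSeg Q lo hi).length - 1) := by
    simp [List.dropLast_eq_take]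
  rw [h1, pvSeg_length Q lo hi hhi (by omega)]
  simp only [pvSeg, List.take_take]
  congr 1
  omega

theorem pvMain (Q : List Int) (d : Nat) : ∀ (lo hi : Nat) (H : List Int),
    hi < Q.length → lo ≤ hi → hi - lo = d →
    P_to_H_loop H (pvSeg Q lo hi) = H ++ P_to_H_altLoop Q lo hi := by
  induction d with
  | zero =>
    intro lo hi H hh hl hd
    have hlh : lo = hi := by omega
    rw [P_to_H_loop, P_to_H_altLoop]
    rw [dif_neg (by rw [pvSeg_length Q lo hi hh hl]; omega), dif_neg (by omega)]
    simp
  | succ n ih =>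
    intro lo hi H hh hl hd
    have hlt : lo < hi := by omega
    have hlen : (pvSeg Q lo hi).length = hi + 1 - lo := pvSeg_length Q lo hi hh hl
    have h2 : 1 < (pvSeg Q lo hi).length := by omega
    rw [P_to_H_loop, P_to_H_altLoop, dif_pos h2, dif_pos hlt]
    have e0 : PySem.List.pyGetD (pvSeg Q lo hi) 0 0 = Q.getD lo 0 := by
      rw [PySem.List.pyGetD_eq_getElem (pvSeg Q lo hi) (i := 0) 0 (by omega)
        (by rw [hlen]; omega)]
      simp only [Int.toNat_zero]
      rw [pvSeg_getElem Q lo hi 0 hh (by omega)]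
      rw [List.getD_eq_getElem Q 0 (by omega)]
      simp
    have em1 : PySem.List.pyGetD (pvSeg Q lo hi) (-1) 0 = Q.getD hi 0 := by
      rw [PySem.List.pyGetD_neg_ofNat (pvSeg Q lo hi) 1 0 (by omega) (by omega)]
      simp only [show (pvSeg Q lo hi).length - 1 = hi - lo from by omega]
      rw [pvSeg_getElem Q lo hi (hi - lo) hh (by omega)]
      simp only [show lo + (hi - lo) = hi from by omega]
      rw [List.getD_eq_getElem Q 0 (by omega)]
    have e1 : PySem.List.pyGetD (pvSeg Q lo hi) 1 0 = Q.getD (lo + 1) 0 := by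
      rw [PySem.List.pyGetD_eq_getElem (pvSeg Q lo hi) (i := 1) 0 (by omega)
        (by rw [hlen]; omega)]
      simp only [Int.toNat_one]
      rw [pvSeg_getElem Q lo hi 1 hh (by omega)]
      rw [List.getD_eq_getElem Q 0 (by omega)]
    have em2 : PySem.List.pyGetD (pvSeg Q lo hi) (-2) 0 = Q.getD (hi - 1) 0 := by
      rw [PySem.List.pyGetD_neg_ofNat (pvSeg Q lo hi) 2 0 (by omega) (by omega)]
      simp only [show (pvSeg Q lo hi).length - 2 = hi - 1 - lo from by omega]
      rw [pvSeg_getElem Q lo hi (hi - 1 - lo) hh (by omega)]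
      simp only [show lo + (hi - 1 - lo) = hi - 1 from by omega]
      rw [List.getD_eq_getElem Q 0 (by omega)]
    rw [e0, em1]
    by_cases hc : Q.getD lo 0 > Q.getD hi 0
    · rw [if_pos hc, if_pos hc, e1]
      rw [PySem.List.slice_from_one, pvSeg_tail Q lo hi]
      rw [ih (lo + 1) hi (H ++ [Q.getD (lo + 1) 0]) hh (by omega) (by omega)]
      simp
    · rw [if_neg hc, if_neg hc, em2]
      rw [PySem.List.slice_to_neg_one, pvSeg_dropLast Q lo hi hh hlt]
      rw [ih lo (hi - 1) (H ++ [Q.getD (hi - 1) 0]) (by omega) (by omega) (by omega)]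
      simp

-- ===== VERDICT (by name: the statement is the Claim_ definition above) =====
theorem P_to_H_spec : Claim_equal_P_to_H := by
  intro P _
  unfold Spec_P_to_H P_to_H P_to_H_alt
  rcases P with _ | ⟨x, xs⟩
  · rw [P_to_H_loop, P_to_H_altLoop]; simp
  · have h : pvSeg (x :: xs) 0 ((x :: xs).length - 1) = x :: xs := by
      simp [pvSeg]
    have hm := pvMain (x :: xs) ((x :: xs).length - 1) 0 ((x :: xs).length - 1) []
      (by simp) (by omega) rfl
    rw [h] at hm
    simpa using hm
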